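-- pv_equiv track=rewrite | github.com/DhruvilJayani/grpc | nodes/nodeA/client.py | generate_rows
-- ===== SOURCE A (Python) =====
-- def generate_rows(num_rows):
--     """
--     Generate `num_rows` rows with 16 comma-separated columns.
--     The first column is the row index (starting from 0), and the next 15 columns
--     are generated as A{row}, B{row}, ..., O{row}.
--     """
--     rows = []
--     letters = "ABCDEFGHIJKLMNO"  # 15 letters
--     for i in range(num_rows):
--         # Start with the index as the first field.
--         fields = [str(i)]
--         # Append 15 fields based on letters and the row index.
--         for letter in letters:
--             fields.append(f"{letter}{i}")
--         # Join fields with commas.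
--         row = ",".join(fields)
--         rows.append(row)
--     return rows
-- ===== SOURCE B (Python) =====
-- def generate_rows(num_rows):
--     # One join per row: the row index string is the SEPARATOR between fixed parts.
--     parts = [""] + ["," + letter for letter in "ABCDEFGHIJKLMNO"] + [""]
--     return [str(i).join(parts) for i in range(num_rows)]
-- ===== Notes on version B (the rewrite author's own statement) =====
-- stated objective: simpler
-- what changed: A builds each row by looping over the letters A..O to append per-letter fields and then comma-joining them; B precomputes one fixed list of parts and produces each row with a single str(i).join, the row-index string acting as the separator, so the inner per-letter loop disappears.
import Mathlib
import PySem

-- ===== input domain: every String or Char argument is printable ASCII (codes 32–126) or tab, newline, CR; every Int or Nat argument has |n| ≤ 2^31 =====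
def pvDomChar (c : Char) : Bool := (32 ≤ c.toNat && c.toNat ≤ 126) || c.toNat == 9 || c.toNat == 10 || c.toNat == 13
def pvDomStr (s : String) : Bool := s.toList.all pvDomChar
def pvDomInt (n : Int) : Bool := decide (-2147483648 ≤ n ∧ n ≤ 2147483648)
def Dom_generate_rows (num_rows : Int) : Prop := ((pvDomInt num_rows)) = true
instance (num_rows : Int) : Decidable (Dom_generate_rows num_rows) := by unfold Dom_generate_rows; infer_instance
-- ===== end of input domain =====

-- B replaces A's inner per-letter field-building loop by a single join per row
-- with the row-index string as the separator between fixed parts (objective: simpler).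

-- ===== PORT A =====
def generate_rows (num_rows : Int) : List String :=
  (PySem.List.pyRange 0 num_rows 1).foldl
    (fun rows i =>
      let fields := ("ABCDEFGHIJKLMNO".toList).foldl
        (fun fields letter => fields ++ [String.ofList (letter :: (PySem.Int.toStr i).toList)])
        [PySem.Int.toStr i]
      rows ++ [PySem.Str.join "," fields]) []

-- ===== PORT B =====
def generate_rows_alt (num_rows : Int) : List String :=
  let parts := [""] ++ ("ABCDEFGHIJKLMNO".toList).map (fun c => String.ofList [',', c]) ++ [""]
  (PySem.List.pyRange 0 num_rows 1).map (fun i => PySem.Str.join (PySem.Int.toStr i) parts)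

-- ===== PRECONDITION & SPEC =====
def Spec_generate_rows (num_rows : Int) (out : List String) : Prop := out = generate_rows_alt num_rows
instance (num_rows : Int) (out : List String) : Decidable (Spec_generate_rows num_rows out) := by unfold Spec_generate_rows; infer_instance

-- ===== CLAIM (what is proved, stated in full; the proofs are below) =====
def Claim_equal_generate_rows : Prop := ∀ (num_rows : Int), Dom_generate_rows num_rows → Spec_generate_rows num_rows (generate_rows num_rows)

-- ===== LEMMAS AND PROOFS =====

lemma ic_single {α : Type} (sep a : List α) : sep.intercalate [a] = a := by
  simp [List.intercalate]

lemma ic_cons₂ {α : Type} (sep a b : List α) (l : List (List α)) :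
    sep.intercalate (a :: b :: l) = a ++ sep ++ sep.intercalate (b :: l) := by
  simp [List.intercalate, List.intersperse_cons₂]

-- pulling one copy of the separator s from the front of each block to its back
lemma rot (s ls : List Char) :
    s ++ ls.flatMap (fun c => ',' :: c :: s) = ls.flatMap (fun c => s ++ [',', c]) ++ s := by
  induction ls with
  | nil => simp
  | cons c t ih =>
    simp only [List.flatMap_cons, List.append_assoc] at *
    rw [show (',' :: c :: s) ++ t.flatMap (fun c => ',' :: c :: s)
        = [',', c] ++ (s ++ t.flatMap (fun c => ',' :: c :: s)) from by simp, ih]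

lemma interA (xs : List (List Char)) (s : List Char) :
    [','].intercalate (s :: xs) = s ++ xs.flatMap (fun x => ',' :: x) := by
  induction xs generalizing s with
  | nil => simp [ic_single]
  | cons x t ih => rw [ic_cons₂, ih]; simp

lemma interB (ps : List (List Char)) (s p : List Char) :
    s.intercalate (p :: ps) = p ++ ps.flatMap (fun q => s ++ q) := by
  induction ps generalizing p with
  | nil => simp [ic_single]
  | cons q t ih => rw [ic_cons₂, ih]; simp

-- per row: A's comma-join of the 16 built fields = B's join with the index string as separator
lemma row_eq (s : String) (ls : List Char) :
    PySem.Str.join "," (ls.foldl (fun fs c => fs ++ [String.ofList (c :: s.toList)]) [s])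
    = PySem.Str.join s ([""] ++ ls.map (fun c => String.ofList [',', c]) ++ [""]) := by
  rw [PySem.List.foldl_append_singleton_eq_map]
  simp [PySem.Str.join, PySem.Chars.join, List.map_map]
  rw [interA, interB]
  simp [List.flatMap_map, Function.comp, rot]

-- ===== VERDICT (by name: the statement is the Claim_ definition above) =====
theorem generate_rows_spec : Claim_equal_generate_rows := by
  intro n _
  unfold Spec_generate_rows generate_rows generate_rows_alt
  rw [PySem.List.foldl_append_singleton_eq_map]
  simp only [List.nil_append]
  exact List.map_congr_left (fun i _ => row_eq (PySem.Int.toStr i) "ABCDEFGHIJKLMNO".toList)
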